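-- pv_equiv track=rewrite | github.com/harris-boyce/movie-recs | python-ml/src/data_prep.py | _count_feature_categories
-- ===== SOURCE A (Python) =====
-- from typing import Any, Dict, List, Optional, Tuple
--
-- def _count_feature_categories(feature_names: List[str]) -> Dict[str, int]:
--     """Count features by category."""
--     categories = {
--         "text": len([n for n in feature_names if n.startswith("text_")]),
--         "genre": len([n for n in feature_names if n.startswith("genre_")]),
--         "temporal": len([n for n in feature_names if n.startswith("decade_")]),
--         "runtime": len([n for n in feature_names if n.startswith("runtime_")]),
--         "rating": len([n for n in feature_names if n.startswith("rating_")]),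
--         "cast_crew": len(
--             [n for n in feature_names if n.startswith(("cast_", "crew_"))]
--         ),
--     }
--
--     return categories
-- ===== SOURCE B (Python) =====
-- def _count_feature_categories(feature_names):
--     """Count features by category in a single pass over the names."""
--     text = genre = temporal = runtime = rating = cast_crew = 0
--     for n in feature_names:
--         if n.startswith("text_"):
--             text += 1
--         elif n.startswith("genre_"):
--             genre += 1
--         elif n.startswith("decade_"):
--             temporal += 1
--         elif n.startswith("runtime_"):
--             runtime += 1
--         elif n.startswith("rating_"):
--             rating += 1
--         elif n.startswith("cast_") or n.startswith("crew_"):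
--             cast_crew += 1
--     return {
--         "text": text,
--         "genre": genre,
--         "temporal": temporal,
--         "runtime": runtime,
--         "rating": rating,
--         "cast_crew": cast_crew,
--     }
-- ===== Notes on version B (the rewrite author's own statement) =====
-- stated objective: alternative
-- what changed: Replaces six separate filter scans over feature_names (one per category) with a single pass that dispatches each name to one of six counters via a prefix if/elif chain.
import Mathlib
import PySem

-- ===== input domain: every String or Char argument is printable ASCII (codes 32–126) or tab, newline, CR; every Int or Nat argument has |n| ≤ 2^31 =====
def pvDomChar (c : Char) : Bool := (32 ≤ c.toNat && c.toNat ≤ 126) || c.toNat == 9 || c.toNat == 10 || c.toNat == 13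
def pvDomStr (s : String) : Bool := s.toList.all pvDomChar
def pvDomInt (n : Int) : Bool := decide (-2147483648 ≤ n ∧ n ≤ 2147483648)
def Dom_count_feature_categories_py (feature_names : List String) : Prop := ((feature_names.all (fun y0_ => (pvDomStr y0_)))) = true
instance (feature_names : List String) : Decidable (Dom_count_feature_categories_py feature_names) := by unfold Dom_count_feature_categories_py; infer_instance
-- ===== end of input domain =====

-- B replaces A's six filter scans by one pass with six counters and a prefix elif dispatch (alternative decomposition).

-- ===== PORT A =====
-- dict literal with six distinct keys, each value the length of a filter scan
def count_feature_categories_py (feature_names : List String) : List (String × Int) :=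
  [ ("text", ((feature_names.filter (fun n => PySem.Str.startswith n "text_")).length : Int)),
    ("genre", ((feature_names.filter (fun n => PySem.Str.startswith n "genre_")).length : Int)),
    ("temporal", ((feature_names.filter (fun n => PySem.Str.startswith n "decade_")).length : Int)),
    ("runtime", ((feature_names.filter (fun n => PySem.Str.startswith n "runtime_")).length : Int)),
    ("rating", ((feature_names.filter (fun n => PySem.Str.startswith n "rating_")).length : Int)),
    ("cast_crew", ((feature_names.filter (fun n => PySem.Str.startswith n "cast_" || PySem.Str.startswith n "crew_")).length : Int)) ]

-- ===== PORT B =====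
-- the if/elif dispatch of Source B's loop body, over the six-counter state
def cfcStep (st : Int × Int × Int × Int × Int × Int) (n : String) : Int × Int × Int × Int × Int × Int :=
  let (t, g, d, r, ra, cc) := st
  if PySem.Str.startswith n "text_" then (t + 1, g, d, r, ra, cc)
  else if PySem.Str.startswith n "genre_" then (t, g + 1, d, r, ra, cc)
  else if PySem.Str.startswith n "decade_" then (t, g, d + 1, r, ra, cc)
  else if PySem.Str.startswith n "runtime_" then (t, g, d, r + 1, ra, cc)
  else if PySem.Str.startswith n "rating_" then (t, g, d, r, ra + 1, cc)
  else if PySem.Str.startswith n "cast_" || PySem.Str.startswith n "crew_" then (t, g, d, r, ra, cc + 1)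
  else (t, g, d, r, ra, cc)

def count_feature_categories_py_alt (feature_names : List String) : List (String × Int) :=
  let (t, g, d, r, ra, cc) := feature_names.foldl cfcStep (0, 0, 0, 0, 0, 0)
  [("text", t), ("genre", g), ("temporal", d), ("runtime", r), ("rating", ra), ("cast_crew", cc)]

-- ===== PRECONDITION & SPEC =====
def Spec_count_feature_categories_py (feature_names : List String) (out : List (String × Int)) : Prop := out = count_feature_categories_py_alt feature_names
instance (feature_names : List String) (out : List (String × Int)) : Decidable (Spec_count_feature_categories_py feature_names out) := by unfold Spec_count_feature_categories_py; infer_instance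

-- ===== CLAIM (what is proved, stated in full; the proofs are below) =====
def Claim_equal_count_feature_categories_py : Prop := ∀ (feature_names : List String), Dom_count_feature_categories_py feature_names → Spec_count_feature_categories_py feature_names (count_feature_categories_py feature_names)

-- ===== LEMMAS AND PROOFS =====

-- no two of the seven category prefixes are prefixes of one another, so the elif
-- guards are mutually exclusive on any name
theorem sw_excl (n p q : String)
    (hnpq : ¬ p.toList <+: q.toList) (hnqp : ¬ q.toList <+: p.toList)
    (hq : PySem.Str.startswith n q = true) : PySem.Str.startswith n p = false := by
  rw [PySem.Str.startswith_eq] at *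
  rw [PySem.Chars.startswith_iff] at hq
  rw [← Bool.not_eq_true, PySem.Chars.startswith_iff]
  intro hp
  rcases List.prefix_or_prefix_of_prefix hp hq with h | h
  · exact hnpq h
  · exact hnqp h

-- the elif dispatch adds exactly the 0/1 indicator of each (mutually exclusive) category test
theorem cfcStep_eq (st : Int × Int × Int × Int × Int × Int) (n : String) :
    cfcStep st n =
      (st.1 + (if PySem.Str.startswith n "text_" then (1 : Int) else 0),
       st.2.1 + (if PySem.Str.startswith n "genre_" then (1 : Int) else 0),
       st.2.2.1 + (if PySem.Str.startswith n "decade_" then (1 : Int) else 0),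
       st.2.2.2.1 + (if PySem.Str.startswith n "runtime_" then (1 : Int) else 0),
       st.2.2.2.2.1 + (if PySem.Str.startswith n "rating_" then (1 : Int) else 0),
       st.2.2.2.2.2 + (if PySem.Str.startswith n "cast_" || PySem.Str.startswith n "crew_" then (1 : Int) else 0)) := by
  obtain ⟨t, g, d, r, ra, cc⟩ := st
  by_cases h1 : PySem.Str.startswith n "text_" = true
  · simp only [cfcStep, h1, sw_excl n "genre_" "text_" (by decide) (by decide) h1,
      sw_excl n "decade_" "text_" (by decide) (by decide) h1,
      sw_excl n "runtime_" "text_" (by decide) (by decide) h1,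
      sw_excl n "rating_" "text_" (by decide) (by decide) h1,
      sw_excl n "cast_" "text_" (by decide) (by decide) h1,
      sw_excl n "crew_" "text_" (by decide) (by decide) h1,
      Bool.or_self, if_true, if_false, Bool.false_eq_true, add_zero]
  by_cases h2 : PySem.Str.startswith n "genre_" = true
  · simp only [cfcStep, h1, h2,
      sw_excl n "decade_" "genre_" (by decide) (by decide) h2,
      sw_excl n "runtime_" "genre_" (by decide) (by decide) h2,
      sw_excl n "rating_" "genre_" (by decide) (by decide) h2,
      sw_excl n "cast_" "genre_" (by decide) (by decide) h2,
      sw_excl n "crew_" "genre_" (by decide) (by decide) h2,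
      Bool.or_self, if_true, if_false, Bool.false_eq_true, add_zero]
  by_cases h3 : PySem.Str.startswith n "decade_" = true
  · simp only [cfcStep, h1, h2, h3,
      sw_excl n "runtime_" "decade_" (by decide) (by decide) h3,
      sw_excl n "rating_" "decade_" (by decide) (by decide) h3,
      sw_excl n "cast_" "decade_" (by decide) (by decide) h3,
      sw_excl n "crew_" "decade_" (by decide) (by decide) h3,
      Bool.or_self, if_true, if_false, Bool.false_eq_true, add_zero]
  by_cases h4 : PySem.Str.startswith n "runtime_" = true
  · simp only [cfcStep, h1, h2, h3, h4,
      sw_excl n "rating_" "runtime_" (by decide) (by decide) h4,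
      sw_excl n "cast_" "runtime_" (by decide) (by decide) h4,
      sw_excl n "crew_" "runtime_" (by decide) (by decide) h4,
      Bool.or_self, if_true, if_false, Bool.false_eq_true, add_zero]
  by_cases h5 : PySem.Str.startswith n "rating_" = true
  · simp only [cfcStep, h1, h2, h3,
      h4, h5,
      sw_excl n "cast_" "rating_" (by decide) (by decide) h5,
      sw_excl n "crew_" "rating_" (by decide) (by decide) h5,
      Bool.or_self, if_true, if_false, Bool.false_eq_true, add_zero]
  by_cases h6 : (PySem.Str.startswith n "cast_" || PySem.Str.startswith n "crew_") = true
  · simp only [cfcStep, h1, h2, h3,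
      h4, h5, h6, if_true, if_false, Bool.false_eq_true, add_zero]
  · simp only [cfcStep, h1, h2, h3,
      h4, h5, h6, if_false, Bool.false_eq_true, add_zero]

theorem cfc_invariant (l : List String) (st : Int × Int × Int × Int × Int × Int) :
    l.foldl cfcStep st =
      (st.1 + (l.countP (fun n => PySem.Str.startswith n "text_") : Int),
       st.2.1 + (l.countP (fun n => PySem.Str.startswith n "genre_") : Int),
       st.2.2.1 + (l.countP (fun n => PySem.Str.startswith n "decade_") : Int),
       st.2.2.2.1 + (l.countP (fun n => PySem.Str.startswith n "runtime_") : Int),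
       st.2.2.2.2.1 + (l.countP (fun n => PySem.Str.startswith n "rating_") : Int),
       st.2.2.2.2.2 + (l.countP (fun n => PySem.Str.startswith n "cast_" || PySem.Str.startswith n "crew_") : Int)) := by
  induction l generalizing st with
  | nil => simp
  | cons n l ih =>
    rw [List.foldl_cons, ih, cfcStep_eq]
    simp only [List.countP_cons, Prod.mk.injEq]
    push_cast
    refine ⟨by ring, by ring, by ring, by ring, by ring, by ring⟩

-- ===== VERDICT (by name: the statement is the Claim_ definition above) =====
theorem count_feature_categories_py_spec : Claim_equal_count_feature_categories_py := by
  intro fn _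
  unfold Spec_count_feature_categories_py count_feature_categories_py count_feature_categories_py_alt
  rw [cfc_invariant]
  simp [List.countP_eq_length_filter]
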